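-- pv_equiv track=rewrite | github.com/owaliwuligu/COMP90024_A2 | DataMining/SentimentAnalysis.py | MergeUserData
-- ===== SOURCE A (Python) =====
-- def MergeUserData(labelIn, userIn, tweetsIn):
--     data_len = len(userIn)
--     tweets_merge_dict = {}
--     laber_merge_dict = {}
--     for i in range(0, data_len):
--         userId = userIn[i]
--         if userId in tweets_merge_dict:
--             tweets_merge_dict[userId] += ' '+tweetsIn[i]
--         else:
--             tweets_merge_dict[userId] = tweetsIn[i]
--         #
--         laber_merge_dict[userId] = labelIn[i]
--     labelMerge = []
--     userMerge = []
--     tweetsMerge = []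
--     for userId in laber_merge_dict:
--         userMerge.append(userId)
--         labelMerge.append(laber_merge_dict[userId])
--         tweetsMerge.append(tweets_merge_dict[userId])
--     return labelMerge, userMerge, tweetsMerge
-- ===== SOURCE B (Python) =====
-- def MergeUserData(labelIn, userIn, tweetsIn):
--     pos = {}
--     labelMerge = []
--     userMerge = []
--     tweetsMerge = []
--     for i in range(len(userIn)):
--         userId = userIn[i]
--         if userId in pos:
--             j = pos[userId]
--             labelMerge[j] = labelIn[i]
--             tweetsMerge[j] += ' ' + tweetsIn[i]
--         else:
--             pos[userId] = len(userMerge)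
--             userMerge.append(userId)
--             labelMerge.append(labelIn[i])
--             tweetsMerge.append(tweetsIn[i])
--     return labelMerge, userMerge, tweetsMerge
-- ===== Notes on version B (the rewrite author's own statement) =====
-- stated objective: alternative
-- what changed: B replaces A's two intermediate dicts plus a second re-emit loop over the dict keys by a single pass that writes the three result lists directly, updating earlier entries in place through a userId-to-index map; it trades A's dict-of-values accumulation for direct list construction.
import Mathlib
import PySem

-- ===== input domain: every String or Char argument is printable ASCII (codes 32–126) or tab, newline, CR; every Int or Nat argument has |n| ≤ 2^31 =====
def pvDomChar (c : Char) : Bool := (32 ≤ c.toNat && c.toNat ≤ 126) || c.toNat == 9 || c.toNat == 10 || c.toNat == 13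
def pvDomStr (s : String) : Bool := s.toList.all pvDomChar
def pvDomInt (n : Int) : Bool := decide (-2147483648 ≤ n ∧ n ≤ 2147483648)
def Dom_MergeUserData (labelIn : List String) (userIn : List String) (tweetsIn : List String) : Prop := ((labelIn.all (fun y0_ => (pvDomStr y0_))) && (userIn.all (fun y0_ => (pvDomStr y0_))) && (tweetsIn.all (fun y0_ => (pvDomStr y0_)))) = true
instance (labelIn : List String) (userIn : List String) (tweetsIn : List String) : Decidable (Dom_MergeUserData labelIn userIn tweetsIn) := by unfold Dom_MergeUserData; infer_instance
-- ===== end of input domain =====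

-- B rewrites A's two-dicts-then-reemit structure as one pass writing the three
-- result lists directly through a userId→index map (same return value; neither
-- version mutates its arguments).

-- ===== PORT A =====
-- one iteration of A's first loop: state = (tweets_merge_dict, laber_merge_dict)
def pvStepA (labelIn userIn tweetsIn : List String)
    (s : PySem.Dict String String × PySem.Dict String String) (i : Int) :
    PySem.Dict String String × PySem.Dict String String :=
  let userId := PySem.List.pyGetD userIn i ""
  let td :=
    if s.1.contains userId then
      s.1.insert userId (s.1.getD userId "" ++ (" " ++ PySem.List.pyGetD tweetsIn i ""))
    else
      s.1.insert userId (PySem.List.pyGetD tweetsIn i "")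
  let ld := s.2.insert userId (PySem.List.pyGetD labelIn i "")
  (td, ld)

def MergeUserData (labelIn : List String) (userIn : List String) (tweetsIn : List String) :
    List String × List String × List String :=
  let data_len : Int := userIn.length
  let dicts := (PySem.List.pyRange 0 data_len 1).foldl
      (pvStepA labelIn userIn tweetsIn) (PySem.Dict.empty, PySem.Dict.empty)
  let out := dicts.2.keys.foldl
      (fun (acc : List String × List String × List String) userId =>
        (acc.1 ++ [dicts.2.getD userId ""],
         acc.2.1 ++ [userId],
         acc.2.2 ++ [dicts.1.getD userId ""]))
      ([], [], [])
  (out.1, out.2.1, out.2.2)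

-- ===== PORT B =====
-- one iteration of B's loop: state = (pos, labelMerge, userMerge, tweetsMerge)
def pvStepB (labelIn userIn tweetsIn : List String)
    (s : PySem.Dict String Int × List String × List String × List String) (i : Int) :
    PySem.Dict String Int × List String × List String × List String :=
  let userId := PySem.List.pyGetD userIn i ""
  match s.1.get? userId with
  | some j =>
      (s.1,
       PySem.List.pySetD s.2.1 j (PySem.List.pyGetD labelIn i ""),
       s.2.2.1,
       PySem.List.pySetD s.2.2.2 j
         (PySem.List.pyGetD s.2.2.2 j "" ++ (" " ++ PySem.List.pyGetD tweetsIn i "")))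
  | none =>
      (s.1.insert userId (s.2.2.1.length : Int),
       s.2.1 ++ [PySem.List.pyGetD labelIn i ""],
       s.2.2.1 ++ [userId],
       s.2.2.2 ++ [PySem.List.pyGetD tweetsIn i ""])

def MergeUserData_alt (labelIn : List String) (userIn : List String) (tweetsIn : List String) :
    List String × List String × List String :=
  let st := (PySem.List.pyRange 0 (userIn.length : Int) 1).foldl
      (pvStepB labelIn userIn tweetsIn) (PySem.Dict.empty, [], [], [])
  (st.2.1, st.2.2.1, st.2.2.2)

-- ===== PRECONDITION & SPEC =====
-- Pre_ excludes exactly the inputs on which both programs raise IndexError: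
-- labelIn or tweetsIn shorter than userIn (A returns on every input inside Pre_).
def Pre_MergeUserData (labelIn : List String) (userIn : List String) (tweetsIn : List String) : Prop :=
  userIn.length ≤ labelIn.length ∧ userIn.length ≤ tweetsIn.length
instance (labelIn : List String) (userIn : List String) (tweetsIn : List String) : Decidable (Pre_MergeUserData labelIn userIn tweetsIn) := by unfold Pre_MergeUserData; infer_instance

def pvWitness_MergeUserData : List String × List String × List String :=
  (["pos", "neg", "pos"], ["u1", "u2", "u1"], ["hello", "world", "again"])

def Spec_MergeUserData (labelIn : List String) (userIn : List String) (tweetsIn : List String) (out : List String × List String × List String) : Prop := out = MergeUserData_alt labelIn userIn tweetsIn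
instance (labelIn : List String) (userIn : List String) (tweetsIn : List String) (out : List String × List String × List String) : Decidable (Spec_MergeUserData labelIn userIn tweetsIn out) := by unfold Spec_MergeUserData; infer_instance

-- ===== CLAIM (what is proved, stated in full; the proofs are below) =====
def Claim_equal_MergeUserData : Prop := ∀ (labelIn : List String) (userIn : List String) (tweetsIn : List String), Dom_MergeUserData labelIn userIn tweetsIn → Pre_MergeUserData labelIn userIn tweetsIn → Spec_MergeUserData labelIn userIn tweetsIn (MergeUserData labelIn userIn tweetsIn)

-- ===== LEMMAS AND PROOFS =====

-- The invariant tying A's two dicts to B's state after any number of loop steps.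
def pvInv (td ld : PySem.Dict String String) (pos : PySem.Dict String Int)
    (lm um tm : List String) : Prop :=
  ld.items = um.zip lm ∧ td.items = um.zip tm ∧
  lm.length = um.length ∧ tm.length = um.length ∧ um.Nodup ∧
  (∀ x : String, pos.get? x = if x ∈ um then some ((um.idxOf x : Nat) : Int) else none)

-- overwriting the (unique) pair with key u in a zip replaces position idxOf u
theorem pv_zip_replace (um lm : List String) (u v : String)
    (hlen : lm.length = um.length) (hnd : um.Nodup) (hm : u ∈ um) :
    (um.zip lm).map (fun p => if p.1 == u then (u, v) else p)
      = um.zip (lm.set (um.idxOf u) v) := by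
  induction um generalizing lm with
  | nil => cases hm
  | cons a um ih =>
    cases lm with
    | nil => simp at hlen
    | cons b lm =>
      simp only [List.length_cons, Nat.add_right_cancel_iff] at hlen
      simp only [List.nodup_cons] at hnd
      by_cases hau : a = u
      · subst hau
        simp only [List.zip_cons_cons, List.map_cons, beq_self_eq_true, if_pos, List.idxOf_cons_self,
          List.set_cons_zero]
        congr 1
        have hnotin : ∀ p ∈ um.zip lm, p.1 ≠ a := by
          rintro ⟨x, y⟩ hp h
          exact hnd.1 (h ▸ (List.of_mem_zip hp).1)
        calc (um.zip lm).map (fun p => if p.1 == a then (a, v) else p)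
            = (um.zip lm).map id := by
              apply List.map_congr_left
              intro p hp
              simp [beq_iff_eq, hnotin p hp]
          _ = um.zip lm := List.map_id _
      · have hmu : u ∈ um := by
          rcases List.mem_cons.mp hm with h | h
          · exact absurd h.symm hau
          · exact h
        have hbeq : (a == u) = false := beq_false_of_ne hau
        simp only [List.zip_cons_cons, List.map_cons, hbeq, Bool.false_eq_true, if_false,
          List.idxOf_cons_ne _ (by simpa using hau), List.set_cons_succ]
        rw [ih lm hlen hnd.2 hmu]

theorem pv_inv_step (labelIn userIn tweetsIn : List String)
    (td ld : PySem.Dict String String) (pos : PySem.Dict String Int)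
    (lm um tm : List String) (n : Nat)
    (hinv : pvInv td ld pos lm um tm) :
    pvInv (pvStepA labelIn userIn tweetsIn (td, ld) (n : Int)).1
          (pvStepA labelIn userIn tweetsIn (td, ld) (n : Int)).2
          (pvStepB labelIn userIn tweetsIn (pos, lm, um, tm) (n : Int)).1
          (pvStepB labelIn userIn tweetsIn (pos, lm, um, tm) (n : Int)).2.1
          (pvStepB labelIn userIn tweetsIn (pos, lm, um, tm) (n : Int)).2.2.1
          (pvStepB labelIn userIn tweetsIn (pos, lm, um, tm) (n : Int)).2.2.2 := by
  obtain ⟨hld, htd, hllm, hltm, hnd, hpos⟩ := hinv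
  have hkeysld : ld.keys = um := by
    simp only [PySem.Dict.keys, hld]; exact List.map_fst_zip (le_of_eq hllm.symm)
  have hkeystd : td.keys = um := by
    simp only [PySem.Dict.keys, htd]; exact List.map_fst_zip (le_of_eq hltm.symm)
  set u := PySem.List.pyGetD userIn (n : Int) "" with hu
  by_cases hmem : u ∈ um
  · -- seen user: A overwrites both dicts in place, B updates position idxOf u
    have hidx : um.idxOf u < um.length := List.idxOf_lt_length_of_mem hmem
    have hgetu : um[um.idxOf u] = u := List.getElem_idxOf hidx
    have hcontt : td.contains u = true := (PySem.Dict.contains_iff_mem_keys td u).mpr (hkeystd ▸ hmem)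
    have hcontl : ld.contains u = true := (PySem.Dict.contains_iff_mem_keys ld u).mpr (hkeysld ▸ hmem)
    have htmval : td.getD u "" = tm[um.idxOf u]'(hltm ▸ hidx) := by
      apply PySem.Dict.getD_of_mem_items
      · rw [htd]
        have hz : (um.zip tm)[um.idxOf u]'(by simp only [List.length_zip, hltm, Nat.min_self]; omega)
            = (u, tm[um.idxOf u]'(hltm ▸ hidx)) := by
          rw [List.getElem_zip, hgetu]
        rw [← hz]; exact List.getElem_mem _
      · rw [hkeystd]; exact hnd
    have hg : pos.get? u = some ((um.idxOf u : Nat) : Int) := by rw [hpos u, if_pos hmem]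
    have hB : pvStepB labelIn userIn tweetsIn (pos, lm, um, tm) (n : Int)
        = (pos, lm.set (um.idxOf u) (PySem.List.pyGetD labelIn (n : Int) ""),
           um, tm.set (um.idxOf u)
             (tm[um.idxOf u]'(by omega) ++ (" " ++ PySem.List.pyGetD tweetsIn (n : Int) ""))) := by
      simp only [pvStepB, ← hu, hg, PySem.List.pySetD_natCast, PySem.List.pyGetD_natCast]
      rw [List.getD_eq_getElem _ _ (show List.idxOf u um < tm.length by omega)]
    have hA : pvStepA labelIn userIn tweetsIn (td, ld) (n : Int)
        = (td.insert u (td.getD u "" ++ (" " ++ PySem.List.pyGetD tweetsIn (n : Int) "")),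
           ld.insert u (PySem.List.pyGetD labelIn (n : Int) "")) := by
      simp only [pvStepA, ← hu, hcontt, if_pos]
    rw [hA, hB]
    refine ⟨?_, ?_, by simp [hllm], by simp [hltm], hnd, hpos⟩
    · rw [PySem.Dict.items_insert_of_contains _ _ hcontl, hld,
        pv_zip_replace um lm u _ hllm hnd hmem]
    · rw [PySem.Dict.items_insert_of_contains _ _ hcontt, htd,
        pv_zip_replace um tm u _ hltm hnd hmem, htmval]
  · -- fresh user: both append
    have hcontt : td.contains u = false := by
      rw [← Bool.not_eq_true, PySem.Dict.contains_iff_mem_keys, hkeystd]; exact hmem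
    have hcontl : ld.contains u = false := by
      rw [← Bool.not_eq_true, PySem.Dict.contains_iff_mem_keys, hkeysld]; exact hmem
    have hg : pos.get? u = none := by rw [hpos u, if_neg hmem]
    have hA : pvStepA labelIn userIn tweetsIn (td, ld) (n : Int)
        = (td.insert u (PySem.List.pyGetD tweetsIn (n : Int) ""),
           ld.insert u (PySem.List.pyGetD labelIn (n : Int) "")) := by
      simp only [pvStepA, ← hu, hcontt, Bool.false_eq_true, if_false]
    have hB : pvStepB labelIn userIn tweetsIn (pos, lm, um, tm) (n : Int)
        = (pos.insert u (um.length : Int),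
           lm ++ [PySem.List.pyGetD labelIn (n : Int) ""],
           um ++ [u],
           tm ++ [PySem.List.pyGetD tweetsIn (n : Int) ""]) := by
      simp only [pvStepB, ← hu, hg]
    rw [hA, hB]
    refine ⟨?_, ?_, by simp [hllm], by simp [hltm], ?_, ?_⟩
    · rw [PySem.Dict.items_insert_of_not_contains _ _ hcontl, hld, List.zip_append hllm.symm]
      rfl
    · rw [PySem.Dict.items_insert_of_not_contains _ _ hcontt, htd, List.zip_append hltm.symm]
      rfl
    · simp only [List.nodup_append, List.nodup_singleton, true_and]
      refine ⟨hnd, fun a ha b hb hab => hmem ?_⟩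
      rw [← List.mem_singleton.mp hb, ← hab]
      exact ha
    · intro x
      rw [PySem.Dict.get?_insert, hpos x]
      by_cases hxu : x = u
      · subst hxu
        simp [List.idxOf_append, hmem]
      · by_cases hxm : x ∈ um
        · simp [hxu, hxm, List.idxOf_append]
        · simp [hxu, hxm]

-- the state after the first n loop iterations, for both programs
def pvRunA (labelIn userIn tweetsIn : List String) (n : Nat) :
    PySem.Dict String String × PySem.Dict String String :=
  ((List.range n).map (fun k : Nat => (k : Int))).foldl (pvStepA labelIn userIn tweetsIn)
    (PySem.Dict.empty, PySem.Dict.empty)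

def pvRunB (labelIn userIn tweetsIn : List String) (n : Nat) :
    PySem.Dict String Int × List String × List String × List String :=
  ((List.range n).map (fun k : Nat => (k : Int))).foldl (pvStepB labelIn userIn tweetsIn)
    (PySem.Dict.empty, [], [], [])

theorem pv_inv_run (labelIn userIn tweetsIn : List String) (n : Nat) :
    pvInv (pvRunA labelIn userIn tweetsIn n).1 (pvRunA labelIn userIn tweetsIn n).2
          (pvRunB labelIn userIn tweetsIn n).1 (pvRunB labelIn userIn tweetsIn n).2.1
          (pvRunB labelIn userIn tweetsIn n).2.2.1 (pvRunB labelIn userIn tweetsIn n).2.2.2 := by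
  induction n with
  | zero =>
    refine ⟨rfl, rfl, rfl, rfl, List.nodup_nil, ?_⟩
    intro x
    simp [pvRunB, PySem.Dict.get?_empty]
  | succ n ih =>
    have hA : pvRunA labelIn userIn tweetsIn (n + 1)
        = pvStepA labelIn userIn tweetsIn (pvRunA labelIn userIn tweetsIn n) (n : Int) := by
      simp [pvRunA, List.range_succ]
    have hB : pvRunB labelIn userIn tweetsIn (n + 1)
        = pvStepB labelIn userIn tweetsIn (pvRunB labelIn userIn tweetsIn n) (n : Int) := by
      simp [pvRunB, List.range_succ]
    rw [hA, hB]
    have := pv_inv_step labelIn userIn tweetsIn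
      (pvRunA labelIn userIn tweetsIn n).1 (pvRunA labelIn userIn tweetsIn n).2
      (pvRunB labelIn userIn tweetsIn n).1 (pvRunB labelIn userIn tweetsIn n).2.1
      (pvRunB labelIn userIn tweetsIn n).2.2.1 (pvRunB labelIn userIn tweetsIn n).2.2.2 n ih
    simpa using this

-- A's emission loop unfolded over an arbitrary key list
theorem pv_emit (ld td : PySem.Dict String String) (ks : List String)
    (a b c : List String) :
    ks.foldl (fun (acc : List String × List String × List String) userId =>
        (acc.1 ++ [ld.getD userId ""], acc.2.1 ++ [userId], acc.2.2 ++ [td.getD userId ""]))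
      (a, b, c)
    = (a ++ ks.map (fun k => ld.getD k ""), b ++ ks, c ++ ks.map (fun k => td.getD k "")) := by
  induction ks generalizing a b c with
  | nil => simp
  | cons k ks ih => simp [List.foldl_cons, ih]

-- keyed lookups over a zip recover the value list
theorem pv_map_getD (d : PySem.Dict String String) (um vm : List String)
    (hitems : d.items = um.zip vm) (hlen : vm.length = um.length) (hnd : um.Nodup) :
    um.map (fun k => d.getD k "") = vm := by
  apply List.ext_getElem (by simp [hlen])
  intro i h1 h2
  simp only [List.getElem_map]
  apply PySem.Dict.getD_of_mem_items
  · rw [hitems]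
    have hz : (um.zip vm)[i]'(by simp only [List.length_zip, hlen, Nat.min_self]; simpa using h1)
        = (um[i]'(by simpa using h1), vm[i]) := List.getElem_zip
    rw [← hz]; exact List.getElem_mem _
  · have hk : d.keys = um := by
      simp only [PySem.Dict.keys, hitems]; exact List.map_fst_zip (le_of_eq hlen.symm)
    rw [hk]; exact hnd

-- ===== VERDICT (by name: the statement is the Claim_ definition above) =====
theorem MergeUserData_spec : Claim_equal_MergeUserData := by
  intro labelIn userIn tweetsIn _ _
  show MergeUserData labelIn userIn tweetsIn = MergeUserData_alt labelIn userIn tweetsIn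
  have hB : MergeUserData_alt labelIn userIn tweetsIn
      = ((pvRunB labelIn userIn tweetsIn userIn.length).2.1,
         (pvRunB labelIn userIn tweetsIn userIn.length).2.2.1,
         (pvRunB labelIn userIn tweetsIn userIn.length).2.2.2) := by
    simp only [MergeUserData_alt]
    rw [PySem.List.pyRange_zero_natCast]
    rfl
  have hA : MergeUserData labelIn userIn tweetsIn
      = ((pvRunA labelIn userIn tweetsIn userIn.length).2.keys.map
           (fun k => (pvRunA labelIn userIn tweetsIn userIn.length).2.getD k ""),
         (pvRunA labelIn userIn tweetsIn userIn.length).2.keys,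
         (pvRunA labelIn userIn tweetsIn userIn.length).2.keys.map
           (fun k => (pvRunA labelIn userIn tweetsIn userIn.length).1.getD k "")) := by
    simp only [MergeUserData]
    rw [PySem.List.pyRange_zero_natCast, pv_emit]
    simp only [List.nil_append]
    rfl
  obtain ⟨hld, htd, hllm, hltm, hnd, _⟩ := pv_inv_run labelIn userIn tweetsIn userIn.length
  have hkeysld : (pvRunA labelIn userIn tweetsIn userIn.length).2.keys
      = (pvRunB labelIn userIn tweetsIn userIn.length).2.2.1 := by
    simp only [PySem.Dict.keys, hld]; exact List.map_fst_zip (le_of_eq hllm.symm)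
  rw [hA, hB, hkeysld,
    pv_map_getD _ _ _ hld hllm hnd, pv_map_getD _ _ _ htd hltm hnd]
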